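-- pv_equiv track=rewrite | github.com/idcrypt3/camp_2019_07_14 | Aman/ColTransCiphere.py | keyword_num_assign
-- ===== SOURCE A (Python) =====
-- def keyword_num_assign(key):
--     alpha = "ABCDEFGHIJKLMNOPQRSTUVWXYZ"
--     kywrd_num_list = list(range(len(key)))
--     init = 0
--     for i in range(len(alpha)):
--         for j in range(len(key)):
--             if alpha[i] == key[j]:
--                 init += 1
--                 kywrd_num_list[j] = init
--     return kywrd_num_list
-- ===== SOURCE B (Python) =====
-- def keyword_num_assign(key):
--     def upper(c):
--         return 'A' <= c <= 'Z'
--     return [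
--         sum(1 for j2, c2 in enumerate(key)
--             if upper(c2) and (c2 < c or (c2 == c and j2 <= j)))
--         if upper(c) else j
--         for j, c in enumerate(key)
--     ]
-- ===== Notes on version B (the rewrite author's own statement) =====
-- stated objective: alternative
-- what changed: Replaces the 26-pass alphabet scan with mutable state by a per-position closed-form rank: each uppercase position's value is the count of uppercase positions with a smaller letter or the same letter at an index <= it, computed as a single comprehension with no mutation.
import Mathlib
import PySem

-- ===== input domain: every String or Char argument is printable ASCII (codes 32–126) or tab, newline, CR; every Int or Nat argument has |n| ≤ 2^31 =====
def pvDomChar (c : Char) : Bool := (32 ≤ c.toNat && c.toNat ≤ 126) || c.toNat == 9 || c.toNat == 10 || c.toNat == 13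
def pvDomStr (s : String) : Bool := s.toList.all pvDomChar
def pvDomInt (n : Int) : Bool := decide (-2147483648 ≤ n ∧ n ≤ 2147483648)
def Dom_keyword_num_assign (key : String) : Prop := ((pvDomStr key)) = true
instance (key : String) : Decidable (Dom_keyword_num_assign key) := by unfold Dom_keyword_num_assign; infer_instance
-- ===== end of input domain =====

-- B replaces A's 26-pass alphabet scan with mutable state by a per-position closed-form
-- count (rank = number of uppercase positions with smaller letter, or same letter at index ≤ it);
-- alternative decomposition, same return value.

-- ===== PORT A =====
-- inner-loop body of A: 'if alpha[i] == key[j]: init += 1; kywrd_num_list[j] = init'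
def pvSetStep (c : Char) (st : List Int × Int) (p : Char × Nat) : List Int × Int :=
  if c == p.1 then (st.1.set p.2 (st.2 + 1), st.2 + 1) else st

def keyword_num_assign (key : String) : List Int :=
  let alpha := "ABCDEFGHIJKLMNOPQRSTUVWXYZ".toList
  let ks := key.toList
  (alpha.foldl (fun st c => ks.zipIdx.foldl (pvSetStep c) st)
    ((List.range ks.length).map Int.ofNat, 0)).1

-- ===== PORT B =====
-- B's helper 'upper(c)'
def pvIsUpper (c : Char) : Bool := decide ('A' ≤ c) && decide (c ≤ 'Z')

def keyword_num_assign_alt (key : String) : List Int :=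
  let ks := key.toList
  ks.zipIdx.map (fun p =>
    if pvIsUpper p.1 then
      ((ks.zipIdx.countP fun q =>
          pvIsUpper q.1 && (decide (q.1 < p.1) || (q.1 == p.1 && decide (q.2 ≤ p.2)))) : Int)
    else (p.2 : Int))

-- ===== PRECONDITION & SPEC =====
def Spec_keyword_num_assign (key : String) (out : List Int) : Prop := out = keyword_num_assign_alt key
instance (key : String) (out : List Int) : Decidable (Spec_keyword_num_assign key out) := by unfold Spec_keyword_num_assign; infer_instance

-- ===== CLAIM (what is proved, stated in full; the proofs are below) =====
def Claim_equal_keyword_num_assign : Prop := ∀ (key : String), Dom_keyword_num_assign key → Spec_keyword_num_assign key (keyword_num_assign key)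

-- ===== LEMMAS AND PROOFS =====

-- characters processed after the first k alphabet letters: uppercase with code < 65 + k
def pvUpLt (k : Nat) (c : Char) : Bool := pvIsUpper c && decide (c.toNat < 65 + k)

-- B's rank of position j holding character x
def pvRank (ks : List Char) (x : Char) (j : Nat) : Int :=
  ((ks.zipIdx.countP fun q =>
      pvIsUpper q.1 && (decide (q.1 < x) || (q.1 == x && decide (q.2 ≤ j)))) : Nat)

theorem pv_char_toNat_inj {a b : Char} (h : a.toNat = b.toNat) : a = b := by
  apply Char.ext; exact UInt32.toNat_inj.mp h

theorem pv_upper_iff (x : Char) : pvIsUpper x = true ↔ 65 ≤ x.toNat ∧ x.toNat ≤ 90 := by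
  simp [pvIsUpper, Char.le_def, UInt32.le_iff_toNat_le]

theorem pv_lt_iff_toNat (a b : Char) : a < b ↔ a.toNat < b.toNat := by
  simp [Char.lt_def, UInt32.lt_iff_toNat_lt]

theorem pv_zipIdx_pairwise {α : Type} (l : List α) (i : Nat) :
    (l.zipIdx i).Pairwise (fun p q => p.2 < q.2) := by
  induction l generalizing i with
  | nil => simp
  | cons a t ih =>
    simp only [List.zipIdx_cons]
    refine List.Pairwise.cons (fun q hq => ?_) (ih (i + 1))
    obtain ⟨h1, _, _⟩ := List.mem_zipIdx (x := q.1) (i := q.2) (k := i + 1) (by simpa using hq)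
    omega

theorem pv_countP_or_disjoint {α : Type} (l : List α) (p q : α → Bool)
    (h : ∀ x ∈ l, ¬(p x = true ∧ q x = true)) :
    l.countP (fun x => p x || q x) = l.countP p + l.countP q := by
  induction l with
  | nil => simp
  | cons a t ih =>
    have ht := ih (fun x hx => h x (List.mem_cons_of_mem a hx))
    have ha := h a (List.mem_cons_self)
    simp only [List.countP_cons, ht]
    cases hp : p a <;> cases hq : q a <;> simp_all <;> omega

theorem pv_inner_snd (c : Char) (ps : List (Char × Nat)) (st : List Int × Int) :
    (ps.foldl (pvSetStep c) st).2 = st.2 + (ps.countP fun p => c == p.1 : Nat) := by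
  induction ps generalizing st with
  | nil => simp
  | cons p t ih =>
    simp only [List.foldl_cons, ih, List.countP_cons, pvSetStep]
    split <;> simp_all <;> push_cast <;> ring

theorem pv_inner_len (c : Char) (ps : List (Char × Nat)) (st : List Int × Int) :
    (ps.foldl (pvSetStep c) st).1.length = st.1.length := by
  induction ps generalizing st with
  | nil => rfl
  | cons p t ih =>
    simp only [List.foldl_cons, pvSetStep]
    split <;> simp [ih]

theorem pv_inner_get (c : Char) (ps : List (Char × Nat)) (st : List Int × Int) (j : Nat)
    (hp : ps.Pairwise (fun p q => p.2 < q.2)) (hmem : ∀ p ∈ ps, p.2 < st.1.length) :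
    ((ps.foldl (pvSetStep c) st).1)[j]? =
      if ps.any (fun p => c == p.1 && p.2 == j)
      then some (st.2 + (ps.countP fun q => c == q.1 && decide (q.2 ≤ j) : Nat))
      else st.1[j]? := by
  induction ps generalizing st with
  | nil => simp
  | cons p t ih =>
    have hpt := (List.pairwise_cons.mp hp).2
    have hph := (List.pairwise_cons.mp hp).1
    simp only [List.foldl_cons, List.any_cons, List.countP_cons]
    by_cases hc : c == p.1
    · have hstep : pvSetStep c st p = (st.1.set p.2 (st.2 + 1), st.2 + 1) := by
        simp [pvSetStep, hc]
      rw [hstep, ih _ hpt (by intro q hq; simpa using hmem q (List.mem_cons_of_mem p hq))]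
      by_cases hany : t.any (fun q => c == q.1 && q.2 == j)
      · -- some later element with index j exists, so p.2 < j
        obtain ⟨q, hqmem, hqp⟩ := List.any_eq_true.mp hany
        have hqj : q.2 = j := by
          have := hqp; simp only [Bool.and_eq_true, Nat.beq_eq_true_eq] at this; exact this.2
        have hlt : p.2 < j := hqj ▸ hph q hqmem
        have hle : decide (p.2 ≤ j) = true := by simp; omega
        simp only [hany, if_true, hc, hle, Bool.and_true, Bool.true_and, if_true,
          Bool.or_true]
        congr 1
        push_cast
        ring
      · simp only [hany, if_false, Bool.or_false]
        by_cases hj : p.2 = j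
        · subst hj
          have hset : (st.1.set p.2 (st.2 + 1))[p.2]? = some (st.2 + 1) :=
            List.getElem?_set_self (hmem p List.mem_cons_self)
          have hzero : (t.countP fun q => c == q.1 && decide (q.2 ≤ p.2)) = 0 := by
            rw [List.countP_eq_zero]
            intro q hq
            have := hph q hq
            simp only [Bool.and_eq_true, decide_eq_true_eq]
            omega
          simp [hc, hset, hzero]
        · have hset : (st.1.set p.2 (st.2 + 1))[j]? = st.1[j]? :=
            List.getElem?_set_ne hj
          have : (p.2 == j) = false := by simpa using hj
          simp [this, hset]
    · have hstep : pvSetStep c st p = st := by simp [pvSetStep, hc]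
      have hc' : (c == p.1) = false := by simpa using hc
      rw [hstep, ih _ hpt (by intro q hq; exact hmem q (List.mem_cons_of_mem p hq))]
      simp [hc']

-- the k-th alphabet letter, concretely
theorem pv_alpha_take (k : Nat) (hk : k < 26) :
    "ABCDEFGHIJKLMNOPQRSTUVWXYZ".toList.take (k + 1) =
      "ABCDEFGHIJKLMNOPQRSTUVWXYZ".toList.take k ++ [Char.ofNat (65 + k)] := by
  revert hk; revert k; decide

theorem pv_alpha_char_toNat (k : Nat) (hk : k < 26) : (Char.ofNat (65 + k)).toNat = 65 + k := by
  revert hk; revert k; decide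

theorem pv_alpha_char_upper (k : Nat) (hk : k < 26) : pvIsUpper (Char.ofNat (65 + k)) = true := by
  revert hk; revert k; decide

theorem pv_any_zipIdx (c : Char) (ks : List Char) (j : Nat) (hj : j < ks.length) :
    (ks.zipIdx.any fun p => c == p.1 && p.2 == j) = (c == ks[j]) := by
  rw [Bool.eq_iff_iff]
  simp only [List.any_eq_true, Bool.and_eq_true, beq_iff_eq, Nat.beq_eq_true_eq, Prod.exists]
  constructor
  · rintro ⟨x, i, hmem, rfl, rfl⟩
    obtain ⟨_, h2, h3⟩ := List.mem_zipIdx (k := 0) hmem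
    simpa using h3
  · rintro rfl
    refine ⟨ks[j], j, ?_, rfl, rfl⟩
    have : (ks.zipIdx 0)[j]? = some (ks[j], j) := by
      simp [List.getElem?_zipIdx, List.getElem?_eq_getElem hj]
    exact List.mem_of_getElem? this


theorem pv_upLt_zero (x : Char) : pvUpLt 0 x = false := by
  cases hu : pvIsUpper x
  · simp [pvUpLt, hu]
  · have := (pv_upper_iff x).mp hu
    simp [pvUpLt, hu]; omega

theorem pv_upLt_26 (x : Char) : pvUpLt 26 x = pvIsUpper x := by
  cases hu : pvIsUpper x
  · simp [pvUpLt, hu]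
  · have := (pv_upper_iff x).mp hu
    simp [pvUpLt, hu]; omega

theorem pv_upLt_succ (k : Nat) (hk : k < 26) (x : Char) :
    pvUpLt (k + 1) x = (pvUpLt k x || (Char.ofNat (65 + k) == x)) := by
  have hc := pv_alpha_char_toNat k hk
  have hcu := pv_alpha_char_upper k hk
  by_cases hx : Char.ofNat (65 + k) = x
  · subst hx
    simp [pvUpLt, hc, hcu]
  · have h1 : (Char.ofNat (65 + k) == x) = false := by simpa using hx
    have h2 : x.toNat ≠ 65 + k := fun h => hx (pv_char_toNat_inj (by rw [hc, h]))
    cases hu : pvIsUpper x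
    · simp [pvUpLt, hu, h1]
    · simp only [pvUpLt, hu, Bool.true_and, h1, Bool.or_false]
      rw [decide_eq_decide]; omega

theorem pv_rank_split (k : Nat) (hk : k < 26) (a : Char) (b : Bool) :
    (pvIsUpper a && (decide (a < Char.ofNat (65 + k)) || (a == Char.ofNat (65 + k) && b)))
      = (pvUpLt k a || ((Char.ofNat (65 + k) == a) && b)) := by
  have hc := pv_alpha_char_toNat k hk
  have hcu := pv_alpha_char_upper k hk
  have hlt : decide (a < Char.ofNat (65 + k)) = decide (a.toNat < 65 + k) := by
    rw [decide_eq_decide, pv_lt_iff_toNat, hc]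
  by_cases hx : Char.ofNat (65 + k) = a
  · subst hx
    simp [pvUpLt, hc, hcu, hlt]
  · have h1 : (a == Char.ofNat (65 + k)) = false := by simpa using (Ne.symm hx)
    have h2 : (Char.ofNat (65 + k) == a) = false := by simpa using hx
    simp [pvUpLt, h1, h2, hlt]

-- outer invariant: after processing the first k alphabet letters
theorem pv_outer_inv (ks : List Char) (k : Nat) (hk : k ≤ 26) :
    (("ABCDEFGHIJKLMNOPQRSTUVWXYZ".toList.take k).foldl
        (fun st c => ks.zipIdx.foldl (pvSetStep c) st)
        ((List.range ks.length).map Int.ofNat, 0)).1.length = ks.length ∧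
    (("ABCDEFGHIJKLMNOPQRSTUVWXYZ".toList.take k).foldl
        (fun st c => ks.zipIdx.foldl (pvSetStep c) st)
        ((List.range ks.length).map Int.ofNat, 0)).2 =
      (ks.zipIdx.countP (fun p => pvUpLt k p.1) : Nat) ∧
    ∀ j, (hj : j < ks.length) →
      (("ABCDEFGHIJKLMNOPQRSTUVWXYZ".toList.take k).foldl
          (fun st c => ks.zipIdx.foldl (pvSetStep c) st)
          ((List.range ks.length).map Int.ofNat, 0)).1[j]? =
        some (if pvUpLt k ks[j] then pvRank ks ks[j] j else (j : Int)) := by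
  induction k with
  | zero =>
    refine ⟨by simp, ?_, ?_⟩
    · have h0 : ks.zipIdx.countP (fun p => pvUpLt 0 p.1) = 0 := by
        simp [List.countP_eq_zero, pv_upLt_zero]
      simp [h0]
    · intro j hj
      have hinit : ((List.range ks.length).map Int.ofNat)[j]? = some (j : Int) := by
        rw [List.getElem?_map, List.getElem?_range hj]
        rfl
      simp only [List.take_zero, List.foldl_nil, hinit, pv_upLt_zero]
      simp
  | succ k ih =>
    have hk' : k < 26 := by omega
    obtain ⟨ih1, ih2, ih3⟩ := ih (by omega)
    rw [pv_alpha_take k hk']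
    simp only [List.foldl_append, List.foldl_cons, List.foldl_nil]
    have hdis0 : ∀ a : Char, pvUpLt k a = true → (Char.ofNat (65 + k) == a) = false := by
      intro a h1
      simp only [pvUpLt, Bool.and_eq_true, decide_eq_true_eq] at h1
      refine beq_eq_false_iff_ne.mpr fun he => ?_
      rw [← he, pv_alpha_char_toNat k hk'] at h1
      omega
    refine ⟨?_, ?_, ?_⟩
    · rw [pv_inner_len]; exact ih1
    · rw [pv_inner_snd, ih2]
      have hcount : ks.zipIdx.countP (fun p => pvUpLt (k + 1) p.1)
          = ks.zipIdx.countP (fun p => pvUpLt k p.1)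
            + ks.zipIdx.countP (fun p => Char.ofNat (65 + k) == p.1) := by
        have hd : ∀ x ∈ ks.zipIdx,
            ¬(pvUpLt k x.1 = true ∧ (Char.ofNat (65 + k) == x.1) = true) := by
          rintro x _ ⟨h1, h2⟩
          rw [hdis0 x.1 h1] at h2
          exact Bool.false_ne_true h2
        rw [← pv_countP_or_disjoint _ _ _ hd]
        apply List.countP_congr
        intro q hq
        simp [pv_upLt_succ k hk']
      rw [hcount]
      push_cast
      ring
    · intro j hj
      have hmem : ∀ p ∈ ks.zipIdx,
          p.2 < (("ABCDEFGHIJKLMNOPQRSTUVWXYZ".toList.take k).foldl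
            (fun st c => ks.zipIdx.foldl (pvSetStep c) st)
            ((List.range ks.length).map Int.ofNat, 0)).1.length := by
        intro p hp
        obtain ⟨_, h2, _⟩ := List.mem_zipIdx (k := 0) hp
        rw [ih1]; omega
      rw [pv_inner_get _ _ _ j (pv_zipIdx_pairwise ks 0) hmem,
        pv_any_zipIdx _ ks j hj]
      by_cases hc : (Char.ofNat (65 + k) == ks[j]) = true
      · have hceq : Char.ofNat (65 + k) = ks[j] := by simpa using hc
        have hup : pvUpLt (k + 1) ks[j] = true := by
          rw [pv_upLt_succ k hk', hc]; simp
        rw [hc, if_pos rfl, if_pos hup, ih2]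
        have hrank : pvRank ks ks[j] j =
            ((ks.zipIdx.countP (fun p => pvUpLt k p.1)
              + ks.zipIdx.countP
                  (fun q => Char.ofNat (65 + k) == q.1 && decide (q.2 ≤ j)) : Nat) : Int) := by
          unfold pvRank
          rw [← hceq]
          congr 1
          have hd : ∀ x ∈ ks.zipIdx,
              ¬(pvUpLt k x.1 = true ∧
                (Char.ofNat (65 + k) == x.1 && decide (x.2 ≤ j)) = true) := by
            rintro x _ ⟨h1, h2⟩
            rw [Bool.and_eq_true] at h2
            rw [hdis0 x.1 h1] at h2
            exact Bool.false_ne_true h2.1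
          rw [← pv_countP_or_disjoint _ _ _ hd]
          apply List.countP_congr
          intro q hq
          rw [pv_rank_split k hk' q.1 (decide (q.2 ≤ j))]
        rw [hrank]
        push_cast
        ring_nf
      · have hcf : (Char.ofNat (65 + k) == ks[j]) = false := by
          simpa using hc
        rw [hcf, if_neg (by simp), ih3 j hj]
        have : pvUpLt (k + 1) ks[j] = pvUpLt k ks[j] := by
          rw [pv_upLt_succ k hk', hcf, Bool.or_false]
        rw [this]

-- ===== VERDICT (by name: the statement is the Claim_ definition above) =====
theorem keyword_num_assign_spec : Claim_equal_keyword_num_assign := by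
  intro key _
  unfold Spec_keyword_num_assign
  simp only [keyword_num_assign, keyword_num_assign_alt]
  obtain ⟨h1, h2, h3⟩ := pv_outer_inv key.toList 26 le_rfl
  rw [show "ABCDEFGHIJKLMNOPQRSTUVWXYZ".toList.take 26
      = "ABCDEFGHIJKLMNOPQRSTUVWXYZ".toList by decide] at h1 h3
  apply List.ext_getElem?
  intro i
  by_cases hi : i < key.toList.length
  · rw [h3 i hi, List.getElem?_map, List.getElem?_zipIdx,
      List.getElem?_eq_getElem hi]
    simp only [Option.map_some, pv_upLt_26, Nat.zero_add]
    rfl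
  · have hA : (("ABCDEFGHIJKLMNOPQRSTUVWXYZ".toList).foldl
        (fun st c => key.toList.zipIdx.foldl (pvSetStep c) st)
        ((List.range key.toList.length).map Int.ofNat, 0)).1[i]? = none := by
      rw [List.getElem?_eq_none]
      rw [h1]; omega
    have hB : (key.toList.zipIdx.map (fun p =>
        if pvIsUpper p.1 then
          ((key.toList.zipIdx.countP fun q =>
              pvIsUpper q.1 && (decide (q.1 < p.1) || (q.1 == p.1 && decide (q.2 ≤ p.2)))) : Int)
        else (p.2 : Int)))[i]? = none := by
      rw [List.getElem?_eq_none]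
      simp only [List.length_map, List.length_zipIdx]
      omega
    rw [hA, hB]
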